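-- pv_equiv track=rewrite | github.com/Emre-Yaz/emre-yaz | DS-A/ArraySequences/LargestConSum.py | extractor
-- ===== SOURCE A (Python) =====
-- def extractor(a):
--
--     delindex = []
--
--     for i in range(len(a)):
--         if a[i] < 0:
--             delindex.append(0)
--         else:
--             break
--
--     for i in range(1,len(a)+1):
--         if a[-i] < 0:
--             delindex.append(-1)
--         else:
--             break
--
--     for i in delindex:
--         del a [i]
--
--     return a
-- ===== SOURCE B (Python) =====
-- def extractor(a):
--     # Two-pointer scan: count leading and trailing negatives, one slice assignment.
--     lead = 0
--     while lead < len(a) and a[lead] < 0: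
--         lead += 1
--     trail = len(a)
--     while trail > lead and a[trail - 1] < 0:
--         trail -= 1
--     a[:] = a[lead:trail]
--     return a
-- ===== Notes on version B (the rewrite author's own statement) =====
-- stated objective: alternative
-- what changed: B replaces A's build-a-deletion-index-list-then-repeatedly-delete-at-front-and-back scheme with a two-pointer scan that counts leading and trailing negatives and takes one slice.
-- outside the precondition, e.g. on extractor([-1, -2]): A raises IndexError, B returns []
-- crash fix: On all-negative lists with at least one element A raises IndexError (the trailing deletions outrun the already-drained list); B strips all elements and returns []. — e.g. on extractor([-1]): A raises IndexError, B returns []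
import Mathlib
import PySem

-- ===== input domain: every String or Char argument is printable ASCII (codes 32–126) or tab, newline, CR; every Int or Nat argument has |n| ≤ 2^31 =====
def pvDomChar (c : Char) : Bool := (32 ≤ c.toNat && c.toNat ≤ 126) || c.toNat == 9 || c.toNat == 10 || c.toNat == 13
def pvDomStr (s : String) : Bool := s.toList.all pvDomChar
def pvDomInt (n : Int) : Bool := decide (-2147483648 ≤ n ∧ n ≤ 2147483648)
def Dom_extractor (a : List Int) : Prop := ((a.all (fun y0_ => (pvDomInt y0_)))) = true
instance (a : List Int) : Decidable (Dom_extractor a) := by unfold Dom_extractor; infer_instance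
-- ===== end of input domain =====

-- B strips leading/trailing negatives with one two-pointer scan and a single slice,
-- instead of A's repeated single-element deletions at the front and back; equivalence is about the RETURN value
-- (both Pythons also mutate `a` in place, to the same final contents where A returns).

-- ===== PORT A =====
-- first loop: `for i in range(len(a)): if a[i] < 0: delindex.append(0) else: break`
-- visits a's elements front-to-back and stops at the first non-negative; ported as
-- structural recursion over the list (exact: a[i] for i in range is the i-th element).
def pvFrontA : List Int → List Int
  | [] => []
  | x :: xs => if x < 0 then 0 :: pvFrontA xs else []

-- second loop: `for i in range(1, len(a)+1): if a[-i] < 0: delindex.append(-1) else: break`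
-- visits a's elements back-to-front; ported as the same recursion applied to a.reverse (exact).
def pvBackA : List Int → List Int
  | [] => []
  | x :: xs => if x < 0 then (-1) :: pvBackA xs else []

-- third loop: `for i in delindex: del a[i]`; del a[i] = PySem.List.pop? (none = IndexError,
-- reached only on all-negative non-empty input, which Pre_ excludes; there we keep a).
def pvDelA : List Int → List Int → List Int
  | a, [] => a
  | a, i :: rest => pvDelA (((PySem.List.pop? a i).map Prod.snd).getD a) rest

def extractor (a : List Int) : List Int :=
  pvDelA a (pvFrontA a ++ pvBackA a.reverse)

-- ===== PORT B =====
-- while lead < len(a) and a[lead] < 0: lead += 1   (fuel only makes the loop total;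
-- a[lead] is in range whenever read, so pyGet? is some there)
def pvLeadGo (a : List Int) : Nat → Nat → Nat
  | 0, lead => lead
  | fuel + 1, lead =>
    if lead < a.length ∧ ((PySem.List.pyGet? a (lead : Int)).getD 0 < 0) then
      pvLeadGo a fuel (lead + 1)
    else lead

-- while trail > lead and a[trail-1] < 0: trail -= 1   (fuel only makes the loop total)
def pvTrailGo (a : List Int) (lead : Nat) : Nat → Nat → Nat
  | 0, trail => trail
  | fuel + 1, trail =>
    if lead < trail ∧ ((PySem.List.pyGet? a ((trail : Int) - 1)).getD 0 < 0) then
      pvTrailGo a lead fuel (trail - 1)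
    else trail

-- a[:] = a[lead:trail]; return a
def extractor_alt (a : List Int) : List Int :=
  let lead := pvLeadGo a a.length 0
  let trail := pvTrailGo a lead a.length a.length
  PySem.List.slice a (some ((lead : Nat) : Int)) (some ((trail : Nat) : Int))

-- ===== PRECONDITION & SPEC =====
-- Pre_ excludes exactly the non-empty all-negative lists, on which A's deletion loop
-- raises IndexError (del a[-1] on an already emptied list).
def Pre_extractor (a : List Int) : Prop := a = [] ∨ ∃ x ∈ a, 0 ≤ x
instance (a : List Int) : Decidable (Pre_extractor a) := by unfold Pre_extractor; infer_instance

def pvWitness_extractor : List Int := [-1, 3, -2]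

-- A raises IndexError on non-empty all-negative lists; B returns [] there.
def Raises_extractor (a : List Int) : Prop := a ≠ [] ∧ ∀ x ∈ a, x < 0
instance (a : List Int) : Decidable (Raises_extractor a) := by unfold Raises_extractor; infer_instance
def pvRaiseWitness_extractor : List Int := [-1]
def pvRaiseWitnessOut_extractor : List Int := []

def Spec_extractor (a : List Int) (out : List Int) : Prop := out = extractor_alt a
instance (a : List Int) (out : List Int) : Decidable (Spec_extractor a out) := by unfold Spec_extractor; infer_instance

-- ===== CLAIM (what is proved, stated in full; the proofs are below) =====
def Claim_equal_extractor : Prop := ∀ (a : List Int), Dom_extractor a → Pre_extractor a → Spec_extractor a (extractor a)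
def Claim_raises_extractor : Prop := (∀ (a : List Int), Dom_extractor a → Raises_extractor a → ¬ Pre_extractor a) ∧ (Dom_extractor (pvRaiseWitness_extractor) ∧ Raises_extractor (pvRaiseWitness_extractor) ∧ extractor_alt (pvRaiseWitness_extractor) = pvRaiseWitnessOut_extractor)

-- ===== LEMMAS AND PROOFS =====

theorem pvTakeWhileLen {α : Type} (p : α → Bool) (l : List α) :
    (l.takeWhile p).length ≤ l.length := by
  induction l with
  | nil => simp
  | cons x xs ih =>
    by_cases hx : p x <;> simp [List.takeWhile_cons, hx] <;> omega

theorem pvFrontA_eq (a : List Int) :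
    pvFrontA a = List.replicate (a.takeWhile (fun x => x < 0)).length 0 := by
  induction a with
  | nil => rfl
  | cons x xs ih =>
    by_cases h : x < 0 <;> simp [pvFrontA, h, ih, List.replicate_succ]

theorem pvBackA_eq (a : List Int) :
    pvBackA a = List.replicate (a.takeWhile (fun x => x < 0)).length (-1) := by
  induction a with
  | nil => rfl
  | cons x xs ih =>
    by_cases h : x < 0 <;> simp [pvBackA, h, ih, List.replicate_succ]

theorem pvDelA_zeros (k : Nat) (a : List Int) (ys : List Int) (hk : k ≤ a.length) :
    pvDelA a (List.replicate k 0 ++ ys) = pvDelA (a.drop k) ys := by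
  induction k generalizing a with
  | zero => simp
  | succ k ih =>
    cases a with
    | nil => simp at hk
    | cons x xs =>
      simp only [List.replicate_succ, List.cons_append, pvDelA,
        PySem.List.pop?_zero_cons, Option.map_some, Option.getD_some]
      rw [ih xs (by simpa using hk)]
      simp

theorem pvDelA_lasts (m : Nat) (a : List Int) (hm : m ≤ a.length) :
    pvDelA a (List.replicate m (-1)) = a.take (a.length - m) := by
  induction m generalizing a with
  | zero => simp [pvDelA]
  | succ m ih =>
    have hne : a ≠ [] := by intro h; subst h; simp at hm
    obtain ⟨xs, x, rfl⟩ : ∃ xs x, a = xs ++ [x] :=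
      ⟨a.dropLast, a.getLast hne, (List.dropLast_append_getLast hne).symm⟩
    simp only [List.replicate_succ, pvDelA, PySem.List.pop?_last, Option.map_some,
      Option.getD_some]
    have hm' : m ≤ xs.length := by simp at hm; omega
    rw [ih xs hm']
    have h1 : (xs ++ [x]).length - (m + 1) = xs.length - m := by simp
    rw [h1]
    rw [List.take_append_of_le_length (by omega)]

theorem pvLeadGo_eq (a : List Int) (fuel i : Nat) (hf : a.length ≤ i + fuel) :
    pvLeadGo a fuel i = i + (List.takeWhile (fun x => x < 0) (a.drop i)).length := by
  induction fuel generalizing i with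
  | zero =>
    simp [pvLeadGo, List.drop_eq_nil_of_le (by omega : a.length ≤ i)]
  | succ fuel ih =>
    by_cases h : i < a.length
    · have hdrop : a.drop i = a[i] :: a.drop (i + 1) := (List.getElem_cons_drop h).symm
      have hget : (PySem.List.pyGet? a (i : Int)).getD 0 = a[i] := by
        simp [PySem.List.pyGet?_natCast, List.getElem?_eq_getElem h]
      by_cases hneg : a[i] < 0
      · rw [pvLeadGo, if_pos ⟨h, by rw [hget]; exact hneg⟩]
        rw [ih (i + 1) (by omega), hdrop, List.takeWhile_cons,
          if_pos (decide_eq_true hneg)]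
        simp only [List.length_cons]
        omega
      · rw [pvLeadGo, if_neg (by rw [hget]; omega)]
        rw [hdrop, List.takeWhile_cons, if_neg (by simpa using hneg)]
        simp
    · rw [pvLeadGo, if_neg (by omega)]
      simp [List.drop_eq_nil_of_le (by omega : a.length ≤ i)]

theorem pvTrailGo_eq (a : List Int) (lead fuel t : Nat) (ht : t ≤ a.length)
    (hfuel : t ≤ fuel)
    (hex : ∃ j, lead ≤ j ∧ ∃ hj : j < t, 0 ≤ a[j]'(by omega)) :
    pvTrailGo a lead fuel t = t - (List.takeWhile (fun x => x < 0) (a.take t).reverse).length := by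
  induction fuel generalizing t with
  | zero =>
    obtain ⟨j, hlj, hjt, hnn⟩ := hex
    omega
  | succ fuel ih =>
    obtain ⟨j, hlj, hjt, hnn⟩ := hex
    have ht0 : 0 < t := by omega
    have htl : t - 1 < a.length := by omega
    have hrev : (a.take t).reverse = a[t - 1] :: (a.take (t - 1)).reverse := by
      conv_lhs => rw [show t = (t - 1) + 1 from by omega]
      rw [List.take_add_one, List.getElem?_eq_getElem htl]
      simp
    have hget : (PySem.List.pyGet? a ((t : Int) - 1)).getD 0 = a[t - 1] := by
      have h' : (t : Int) - 1 = ((t - 1 : Nat) : Int) := by omega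
      rw [h']
      simp [PySem.List.pyGet?_natCast, List.getElem?_eq_getElem htl]
    by_cases hneg : a[t - 1] < 0
    · have hjlt : j < t - 1 := by
        rcases Nat.lt_or_ge j (t - 1) with h' | h'
        · exact h'
        · have : j = t - 1 := by omega
          subst this; omega
      rw [pvTrailGo, if_pos ⟨by omega, by rw [hget]; exact hneg⟩]
      rw [ih (t - 1) (by omega) (by omega) ⟨j, hlj, hjlt, hnn⟩]
      rw [hrev, List.takeWhile_cons, if_pos (decide_eq_true hneg)]
      have hlen : (List.takeWhile (fun x => x < 0) (a.take (t - 1)).reverse).length ≤ t - 1 := by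
        calc (List.takeWhile (fun x => x < 0) (a.take (t - 1)).reverse).length
            ≤ (a.take (t - 1)).reverse.length := pvTakeWhileLen _ _
          _ ≤ t - 1 := by simp
      simp only [List.length_cons]
      omega
    · rw [pvTrailGo, if_neg (by rw [hget]; omega)]
      rw [hrev, List.takeWhile_cons, if_neg (by simpa using hneg)]
      simp

-- takeWhile of an append whose first part contains a failing element stays in the first part
theorem takeWhile_append_of_exists {α : Type} (p : α → Bool) (u v : List α)
    (h : ∃ x ∈ u, ¬ p x) :
    List.takeWhile p (u ++ v) = List.takeWhile p u := by
  induction u with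
  | nil => simp at h
  | cons x xs ih =>
    by_cases hx : p x
    · have h' : ∃ y ∈ xs, ¬ p y := by
        obtain ⟨y, hy, hpy⟩ := h
        rcases List.mem_cons.mp hy with rfl | hy'
        · exact absurd hx hpy
        · exact ⟨y, hy', hpy⟩
      simp [List.takeWhile_cons, hx, ih h']
    · simp [List.takeWhile_cons, hx]

theorem extractor_spec_aux (a : List Int) (hpre : Pre_extractor a) :
    extractor a = extractor_alt a := by
  rcases hpre with rfl | ⟨y, hy, hy0⟩
  · decide
  · set P : Int → Bool := fun x => x < 0 with hP
    set k := (a.takeWhile P).length with hk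
    have hkle : k ≤ a.length := by rw [hk]; exact pvTakeWhileLen _ _
    -- the element at index k (head of the dropWhile part) is non-negative
    have hd : a.dropWhile P ≠ [] := by
      intro hnil
      have heq := List.takeWhile_append_dropWhile (p := P) (l := a)
      rw [hnil, List.append_nil] at heq
      rw [← heq] at hy
      have := List.mem_takeWhile_imp hy
      simp [hP] at this
      omega
    obtain ⟨h0, tl, htl⟩ := List.exists_cons_of_ne_nil hd
    have hhead : ¬ (h0 < 0) := by
      have hh := List.head_dropWhile_not (p := P) (l := a) hd
      simp only [htl, List.head_cons] at hh
      simpa [hP] using hh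
    have hsplit : a = a.takeWhile P ++ (h0 :: tl) := by
      rw [← htl, List.takeWhile_append_dropWhile]
    have hkidx : k < a.length := by
      conv_rhs => rw [hsplit]
      simp [hk]
    have hak : a[k]'hkidx = h0 := by
      conv_lhs => rw [List.getElem_of_eq hsplit]
      rw [List.getElem_append_right (by omega)]
      simp [hk]
    -- trailing negative count
    set m := (a.reverse.takeWhile P).length with hm
    have hdropk : a.drop k = h0 :: tl := by
      conv_lhs => rw [hsplit]
      rw [List.drop_append_of_le_length (by omega)]
      simp [hk]
    have hmrev : a.reverse.takeWhile P = (h0 :: tl).reverse.takeWhile P := by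
      have hra : a.reverse = (h0 :: tl).reverse ++ (a.takeWhile P).reverse := by
        conv_lhs => rw [hsplit]
        simp
      rw [hra]
      apply takeWhile_append_of_exists
      refine ⟨h0, by simp, ?_⟩
      simp [hP]
      omega
    have hmle : m ≤ tl.length + 1 := by
      rw [hm, hmrev]
      calc ((h0 :: tl).reverse.takeWhile P).length ≤ (h0 :: tl).reverse.length :=
            pvTakeWhileLen _ _
        _ = tl.length + 1 := by simp
    have hlen : a.length = k + (tl.length + 1) := by
      conv_lhs => rw [hsplit]
      simp [hk]
    -- A's value
    have hA : extractor a = (a.drop k).take (a.length - k - m) := by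
      rw [extractor, pvFrontA_eq, pvBackA_eq, ← hP, ← hk, ← hm]
      rw [pvDelA_zeros k a _ hkle]
      rw [pvDelA_lasts m (a.drop k) (by simp [hdropk]; omega)]
      congr 1
      simp [hdropk]
      omega
    -- B's value
    have hlead : pvLeadGo a a.length 0 = k := by
      rw [pvLeadGo_eq a a.length 0 (by omega)]
      simp [hk, hP]
    have htrail : pvTrailGo a k a.length a.length = a.length - m := by
      rw [pvTrailGo_eq a k a.length a.length le_rfl le_rfl
        ⟨k, le_rfl, hkidx, by rw [hak]; omega⟩]
      rw [List.take_length]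
    have hB : extractor_alt a = (a.drop k).take (a.length - m - k) := by
      rw [extractor_alt]
      simp only [hlead, htrail]
      rw [PySem.List.slice_natCast]
    rw [hA, hB]
    congr 1
    omega

-- ===== VERDICT (by name: the statement is the Claim_ definition above) =====
theorem extractor_spec : Claim_equal_extractor := by
  intro a _ hpre
  exact extractor_spec_aux a hpre

@[simp]
theorem extractor_raises : Claim_raises_extractor := by
  unfold Claim_raises_extractor
  refine ⟨?_, by decide⟩
  rintro a _ ⟨hne, hall⟩ hpre
  rcases hpre with rfl | ⟨x, hx, hx0⟩
  · exact hne rfl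
  · exact absurd (hall x hx) (by omega)
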